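-- pv_equiv track=rewrite | github.com/zhouxb/app_loggit | loggit/templatetags/loggit_filter.py | ksplit
-- ===== SOURCE A (Python) =====
-- def ksplit(key):
--     keys = key.split('.')
--     keys.reverse()
--
--     res_tmp = []
--     buff = []
--
--     for key in keys:
--         buff.append(key)
--         res_tmp.append(list(buff))
--
--     result = []
--     for res in res_tmp:
--         res.reverse()
--         result.append('.'.join(res))
--
--     return result[1:]
-- ===== SOURCE B (Python) =====
-- def ksplit(key):
--     parts = key.split('.')
--     return ['.'.join(parts[i:]) for i in range(len(parts) - 2, -1, -1)]
-- ===== Notes on version B (the rewrite author's own statement) =====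
-- stated objective: simpler
-- what changed: Replaces A's reverse/accumulate-prefixes/reverse-each/drop-first pipeline with a single comprehension that joins the dotted suffixes parts[i:] for i from len(parts)-2 down to 0.
import Mathlib
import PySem

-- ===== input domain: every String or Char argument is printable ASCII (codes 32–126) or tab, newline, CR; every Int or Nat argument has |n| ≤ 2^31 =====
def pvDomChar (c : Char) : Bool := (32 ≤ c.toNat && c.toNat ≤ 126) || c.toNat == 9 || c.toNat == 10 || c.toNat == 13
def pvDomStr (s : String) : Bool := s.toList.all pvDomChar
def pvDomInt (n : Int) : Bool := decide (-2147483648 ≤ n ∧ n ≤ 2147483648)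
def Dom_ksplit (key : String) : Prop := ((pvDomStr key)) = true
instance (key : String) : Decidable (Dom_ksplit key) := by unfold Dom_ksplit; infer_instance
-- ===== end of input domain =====

-- B builds the dotted suffixes by direct index slicing instead of A's reverse/accumulate-prefixes/reverse-back/drop-first pipeline (simpler).

-- ===== PORT A =====
def ksplit (key : String) : List String :=
  let keys := ((PySem.Str.split? key ".").getD []).reverse   -- split? is some on sep "." (nonempty)
  let st := keys.foldl
    (fun (s : List String × List (List String)) k =>
      (s.1 ++ [k], s.2 ++ [s.1 ++ [k]])) ([], [])
  let result := st.2.foldl (fun acc res => acc ++ [PySem.Str.join "." res.reverse]) []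
  result.drop 1

-- ===== PORT B =====
def ksplit_alt (key : String) : List String :=
  let parts := (PySem.Str.split? key ".").getD []   -- split? is some on sep "." (nonempty)
  (PySem.List.pyRange ((parts.length : Int) - 2) (-1) (-1)).map
    (fun i => PySem.Str.join "." (PySem.List.slice parts (some i) none))

-- ===== PRECONDITION & SPEC =====
def Spec_ksplit (key : String) (out : List String) : Prop := out = ksplit_alt key
instance (key : String) (out : List String) : Decidable (Spec_ksplit key out) := by unfold Spec_ksplit; infer_instance

-- ===== CLAIM (what is proved, stated in full; the proofs are below) =====
def Claim_equal_ksplit : Prop := ∀ (key : String), Dom_ksplit key → Spec_ksplit key (ksplit key)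

-- ===== LEMMAS AND PROOFS =====

/-- A's first loop: `res_tmp` collects the successive non-empty prefixes of `l` prefixed by `b0`. -/
theorem ksplit_loopA (l b0 : List String) (r0 : List (List String)) :
    l.foldl (fun (s : List String × List (List String)) k =>
      (s.1 ++ [k], s.2 ++ [s.1 ++ [k]])) (b0, r0)
    = (b0 ++ l, r0 ++ (List.range l.length).map (fun j => b0 ++ l.take (j+1))) := by
  induction l generalizing b0 r0 with
  | nil => simp
  | cons k l ih =>
      simp only [List.foldl_cons, ih, List.length_cons, List.range_succ_eq_map]
      simp [List.append_assoc, Function.comp_def]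

/-- A's second loop is a map. -/
theorem ksplit_loopB (l : List (List String)) (acc0 : List String) :
    l.foldl (fun acc res => acc ++ [PySem.Str.join "." res.reverse]) acc0
    = acc0 ++ l.map (fun res => PySem.Str.join "." res.reverse) := by
  induction l generalizing acc0 with
  | nil => simp
  | cons x l ih => simp [ih]

/-- The core identity, over an arbitrary split result. -/
theorem ksplit_core (parts : List String) :
    (((List.range parts.reverse.length).map
        (fun j => ([] : List String) ++ parts.reverse.take (j+1))).map
      (fun res => PySem.Str.join "." res.reverse)).drop 1
    = (PySem.List.pyRange ((parts.length : Int) - 2) (-1) (-1)).map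
        (fun i => PySem.Str.join "." (PySem.List.slice parts (some i) none)) := by
  cases hn : parts.length with
  | zero =>
      have h0 : parts = [] := List.length_eq_zero_iff.mp hn
      subst h0
      simp
  | succ m =>
      have hcoe : ((m + 1 : Nat) : Int) - 2 = (m : Int) - 1 := by push_cast; ring
      rw [List.length_reverse, hn, hcoe, PySem.List.pyRange_neg_one]
      have harg : ((m : Int) - 1 - -1).toNat = m := by omega
      rw [harg, List.range_succ_eq_map, List.map_cons, List.map_cons,
        List.drop_succ_cons, List.drop_zero, List.map_map, List.map_map, List.map_map]
      apply List.map_congr_left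
      intro t ht
      rw [List.mem_range] at ht
      have h1 : (0 : Int) ≤ (m : Int) - 1 - t := by omega
      simp only [Function.comp_def]
      rw [PySem.List.slice_from (ha := h1)]
      have h2 : ((m : Int) - 1 - t).toNat = m - 1 - t := by omega
      rw [h2]
      congr 1
      rw [List.nil_append, List.take_reverse, List.reverse_reverse, hn]
      congr 1
      omega

theorem ksplit_spec : Claim_equal_ksplit := by
  intro key _
  unfold Spec_ksplit ksplit ksplit_alt
  simp only [ksplit_loopA, ksplit_loopB, List.nil_append]
  exact ksplit_core ((PySem.Str.split? key ".").getD [])
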